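-- pv_equiv track=rewrite | github.com/loganjoslin/Final-Project | backup3.py | front_partner_check
-- ===== SOURCE A (Python) =====
-- def front_partner_check(Student, F, C):
--     # Find all C partners
--     partners = []
--     for pair in C:
--         if pair[0] == Student:
--             partners.append(pair[1])
--         if pair[1] == Student:
--             partners.append(pair[0])
--     for S in partners:
--         if S in F:
--             return True
--     return False
-- ===== SOURCE B (Python) =====
-- def front_partner_check(Student, F, C):
--     # inverted traversal: index C's pairs in a set, then scan the friend list F
--     pairs = {tuple(p) for p in C}
--     return any((Student, f) in pairs or (f, Student) in pairs for f in F)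
-- ===== Notes on version B (the rewrite author's own statement) =====
-- stated objective: alternative
-- what changed: Inverts the traversal: instead of scanning C to collect Student's partners and then testing them against F, B indexes C's pairs in a hash set once and scans F, testing each friend f for (Student,f) or (f,Student) in the set; no partners list exists and the loop runs over F, not C.
import Mathlib
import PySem

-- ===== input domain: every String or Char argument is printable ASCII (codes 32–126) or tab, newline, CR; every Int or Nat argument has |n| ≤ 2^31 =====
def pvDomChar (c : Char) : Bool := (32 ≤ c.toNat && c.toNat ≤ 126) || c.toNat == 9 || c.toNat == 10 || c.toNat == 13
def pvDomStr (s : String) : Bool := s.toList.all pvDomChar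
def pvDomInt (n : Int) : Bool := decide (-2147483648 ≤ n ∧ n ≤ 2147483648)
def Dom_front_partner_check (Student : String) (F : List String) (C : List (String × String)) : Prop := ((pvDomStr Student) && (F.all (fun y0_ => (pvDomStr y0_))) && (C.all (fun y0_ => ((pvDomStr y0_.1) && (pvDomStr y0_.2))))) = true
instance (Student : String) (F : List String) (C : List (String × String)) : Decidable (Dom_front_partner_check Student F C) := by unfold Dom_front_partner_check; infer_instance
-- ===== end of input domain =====

-- B inverts the traversal: it indexes C's pairs in a set and scans F instead of scanning C for partners (alternative decomposition, same result).

-- ===== PORT A =====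
-- A: build the partners list by scanning C, then scan it for any member of F (early return ↦ List.any)
def front_partner_check (Student : String) (F : List String) (C : List (String × String)) : Bool :=
  let partners := C.foldl (fun acc pair =>
    let acc := if pair.1 == Student then acc ++ [pair.2] else acc
    if pair.2 == Student then acc ++ [pair.1] else acc) []
  partners.any (fun S => F.contains S)

-- ===== PORT B =====
-- B: build the set of C's pairs once, then scan F asking whether (Student,f) or (f,Student) is a pair
-- (Python's 'any(... for f in F)' with early exit ↦ List.any)
def front_partner_check_alt (Student : String) (F : List String) (C : List (String × String)) : Bool :=
  let pairs : PySem.Set (String × String) := PySem.Set.ofList C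
  F.any (fun f => pairs.contains (Student, f) || pairs.contains (f, Student))

-- ===== PRECONDITION & SPEC =====
def Spec_front_partner_check (Student : String) (F : List String) (C : List (String × String)) (out : Bool) : Prop := out = front_partner_check_alt Student F C
instance (Student : String) (F : List String) (C : List (String × String)) (out : Bool) : Decidable (Spec_front_partner_check Student F C out) := by unfold Spec_front_partner_check; infer_instance

-- ===== CLAIM (what is proved, stated in full; the proofs are below) =====
def Claim_equal_front_partner_check : Prop := ∀ (Student : String) (F : List String) (C : List (String × String)), Dom_front_partner_check Student F C → Spec_front_partner_check Student F C (front_partner_check Student F C)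

-- ===== LEMMAS AND PROOFS =====

-- A's fold-then-scan equals the fused existential over C
lemma fpc_fold_any (Student : String) (F : List String) (C : List (String × String)) :
    ∀ acc : List String,
      ((C.foldl (fun acc pair =>
          let acc := if pair.1 == Student then acc ++ [pair.2] else acc
          if pair.2 == Student then acc ++ [pair.1] else acc) acc).any (fun S => F.contains S))
      = (acc.any (fun S => F.contains S) ||
         C.any (fun p => (p.1 == Student && F.contains p.2) || (p.2 == Student && F.contains p.1))) := by
  induction C with
  | nil => simp
  | cons hd tl ih =>
      intro acc
      simp only [List.foldl_cons, List.any_cons, ih]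
      by_cases h1 : hd.1 == Student <;> by_cases h2 : hd.2 == Student <;>
        simp [h1, h2, List.any_append, Bool.or_assoc, Bool.or_comm, Bool.or_left_comm]

-- swapping the quantifier order: scanning C for partners in F = scanning F for pairs in C
lemma fpc_swap (Student : String) (F : List String) (C : List (String × String)) :
    C.any (fun p => (p.1 == Student && F.contains p.2) || (p.2 == Student && F.contains p.1))
    = F.any (fun f => (PySem.Set.ofList C).contains (Student, f) || (PySem.Set.ofList C).contains (f, Student)) := by
  rw [Bool.eq_iff_iff]
  simp only [List.any_eq_true, Bool.or_eq_true, Bool.and_eq_true, beq_iff_eq,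
    List.contains_eq_mem, decide_eq_true_eq, PySem.Set.contains, PySem.Set.mem_ofList]
  constructor
  · rintro ⟨⟨a, b⟩, hp, ⟨h1, hf⟩ | ⟨h2, hf⟩⟩
    · exact ⟨b, hf, Or.inl (h1 ▸ hp)⟩
    · exact ⟨a, hf, Or.inr (h2 ▸ hp)⟩
  · rintro ⟨f, hf, h | h⟩
    · exact ⟨(Student, f), h, Or.inl ⟨rfl, hf⟩⟩
    · exact ⟨(f, Student), h, Or.inr ⟨rfl, hf⟩⟩

-- ===== VERDICT (by name: the statement is the Claim_ definition above) =====
theorem front_partner_check_spec : Claim_equal_front_partner_check := by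
  intro Student F C _
  unfold Spec_front_partner_check front_partner_check front_partner_check_alt
  rw [fpc_fold_any Student F C [], fpc_swap]
  simp
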